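-- pv_equiv track=rewrite | github.com/uvsq22206151/l1-python | exercises/TD04_listes/carre_magique.py | estNormal
-- ===== SOURCE A (Python) =====
-- def estNormal(carre):
--     """ Retourne True si contient toutes les valeurs de 1 à n^2 où n est la taille
--         du carré, et False sinon """
--     liste=[]
--     for ligne in carre:
--         liste.extend(ligne)
--     for i in range(1,len(carre)*len(carre)+1):
--         if i not in liste:
--             return False
--     return True
-- ===== SOURCE B (Python) =====
-- def estNormal(carre):
--     """ Retourne True si contient toutes les valeurs de 1 à n^2 où n est la taille
--         du carré, et False sinon """
--     n = len(carre)
--     targets = set(range(1, n * n + 1))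
--     for ligne in carre:
--         for v in ligne:
--             targets.discard(v)
--     return not targets
-- ===== Notes on version B (the rewrite author's own statement) =====
-- stated objective: alternative
-- what changed: A scans the flattened grid once per target value (for each i in 1..n^2, 'i in liste'); B flips the loop: it builds the set of still-missing targets once and makes a single pass over the grid cells, discarding each cell's value, returning True iff the set is empty.
import Mathlib
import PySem

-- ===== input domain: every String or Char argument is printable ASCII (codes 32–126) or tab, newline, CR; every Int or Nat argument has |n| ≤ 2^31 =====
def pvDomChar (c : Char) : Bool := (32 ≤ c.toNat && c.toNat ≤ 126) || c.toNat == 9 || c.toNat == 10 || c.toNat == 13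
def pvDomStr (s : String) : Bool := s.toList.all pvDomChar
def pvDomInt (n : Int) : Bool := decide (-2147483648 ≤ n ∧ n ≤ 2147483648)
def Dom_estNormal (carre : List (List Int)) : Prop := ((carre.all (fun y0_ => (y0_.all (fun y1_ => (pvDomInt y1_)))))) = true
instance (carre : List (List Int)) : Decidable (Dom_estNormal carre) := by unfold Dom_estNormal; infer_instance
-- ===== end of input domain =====

-- B replaces A's per-target scan of the flattened grid with one pass over the cells
-- that crosses each value off a shrinking set of missing targets (objective: alternative decomposition).

-- ===== PORT A =====
-- the 'for i in range(...): if i not in liste: return False' loop with early return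
def estNormalLoopA (liste : List Int) : List Int → Bool
  | [] => true
  | i :: rest => if i ∈ liste then estNormalLoopA liste rest else false

def estNormal (carre : List (List Int)) : Bool :=
  let liste := carre.foldl (fun acc ligne => acc ++ ligne) []
  estNormalLoopA liste (PySem.List.pyRange 1 (carre.length * carre.length + 1) 1)

-- ===== PORT B =====
def estNormal_alt (carre : List (List Int)) : Bool :=
  let n : Int := carre.length
  let targets : PySem.Set Int := PySem.Set.ofList (PySem.List.pyRange 1 (n * n + 1) 1)
  let targets :=
    carre.foldl (fun t ligne => ligne.foldl (fun t v => PySem.Set.discard t v) t) targets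
  targets.isEmpty

-- ===== PRECONDITION & SPEC =====
def Spec_estNormal (carre : List (List Int)) (out : Bool) : Prop := out = estNormal_alt carre
instance (carre : List (List Int)) (out : Bool) : Decidable (Spec_estNormal carre out) := by unfold Spec_estNormal; infer_instance

-- ===== CLAIM (what is proved, stated in full; the proofs are below) =====
def Claim_equal_estNormal : Prop := ∀ (carre : List (List Int)), Dom_estNormal carre → Spec_estNormal carre (estNormal carre)

-- ===== LEMMAS AND PROOFS =====

theorem loopA_eq_all (liste : List Int) (l : List Int) :
    estNormalLoopA liste l = l.all (fun i => decide (i ∈ liste)) := by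
  induction l with
  | nil => rfl
  | cons i rest ih =>
      simp [estNormalLoopA, List.all_cons]
      by_cases h : i ∈ liste <;> simp [h, ih]

theorem foldl_append_eq_flatten' (carre : List (List Int)) (acc : List Int) :
    carre.foldl (fun acc ligne => acc ++ ligne) acc = acc ++ carre.flatten := by
  induction carre generalizing acc with
  | nil => simp
  | cons x xs ih => simp [List.foldl_cons, ih, List.flatten_cons]

theorem mem_foldl_discard (xs : List Int) (s : PySem.Set Int) (y : Int) :
    y ∈ xs.foldl (fun t v => PySem.Set.discard t v) s ↔ y ∈ s ∧ y ∉ xs := by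
  induction xs generalizing s with
  | nil => simp
  | cons v rest ih =>
      simp only [List.foldl_cons, ih, PySem.Set.mem_discard, List.mem_cons]
      tauto

theorem mem_foldl_rows (rows : List (List Int)) (s : PySem.Set Int) (y : Int) :
    y ∈ rows.foldl (fun t ligne => ligne.foldl (fun t v => PySem.Set.discard t v) t) s
      ↔ y ∈ s ∧ y ∉ rows.flatten := by
  induction rows generalizing s with
  | nil => simp
  | cons r rest ih =>
      simp only [List.foldl_cons, ih, mem_foldl_discard, List.flatten_cons, List.mem_append]
      tauto

-- ===== VERDICT (by name: the statement is the Claim_ definition above) =====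
theorem estNormal_spec : Claim_equal_estNormal := by
  intro carre _
  show estNormal carre = estNormal_alt carre
  unfold estNormal estNormal_alt
  simp only [loopA_eq_all, foldl_append_eq_flatten', List.nil_append]
  rw [Bool.eq_iff_iff]
  constructor
  · intro h
    rw [List.isEmpty_iff, List.eq_nil_iff_forall_not_mem]
    intro y hy
    rw [mem_foldl_rows] at hy
    rcases hy with ⟨hmem, hnot⟩
    rw [PySem.Set.mem_ofList] at hmem
    have := List.all_eq_true.mp h y ?_
    · exact hnot (by simpa using this)
    · simpa using hmem
  · intro h
    rw [List.isEmpty_iff, List.eq_nil_iff_forall_not_mem] at h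
    rw [List.all_eq_true]
    intro i hi
    by_contra hno
    exact h i (by
      rw [mem_foldl_rows, PySem.Set.mem_ofList]
      exact ⟨by simpa using hi, by simpa using hno⟩)
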